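-- pv_equiv track=rewrite | github.com/ihgazni2/dlixhict-didactic | xdict/cmdline.py | get_cmd_char_position_desc
-- ===== SOURCE A (Python) =====
-- def get_cmd_char_position_desc(cmd_pl,cmd_sp=' '):
--     '''
--         >>>
--         >>> cmd_pl = ['defaultComponents', 'header', 'props', 'navigation', 'menu', 'items', '2', 'link', 'disabled']
--         >>> cpdesc = get_cmd_char_position_desc(cmd_pl,cmd_sp=' ')
--         >>> cpdesc
--         [(0, 16), (18, 23), (25, 29), (31, 40), (42, 45), (47, 51), (53, 53), (55, 58), (60, 67)]
--         >>> si = 21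
--         >>> ei = 35
--         >>> get_interval_si_from_char_position_desc(si,cpdesc)
--         18
--         >>> get_interval_ei_from_char_position_desc(ei,cpdesc)
--         40
--         >>> si in range(18,23+1)
--         True
--         >>> ei in range(31,40+1)
--         True
--         >>>
--     '''
--     sp_len = cmd_sp.__len__()
--     desc = []
--     curr = 0
--     for i in range(0,cmd_pl.__len__()):
--         supp = sp_len * i
--         kw = cmd_pl[i]
--         l = kw.__len__()
--         end = curr + l - 1
--         desc.append((curr+supp,end+supp))
--         curr = end + 1
--     return(desc)
-- ===== SOURCE B (Python) =====
-- def get_cmd_char_position_desc(cmd_pl, cmd_sp=' '):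
--     # pass 1: table of cumulative word lengths before each index
--     prefix = [0]
--     for w in cmd_pl:
--         prefix.append(prefix[-1] + len(w))
--     sp = len(cmd_sp)
--     # pass 2: index-driven interval construction from the table
--     return [(prefix[i] + i * sp, prefix[i] + len(w) - 1 + i * sp)
--             for i, w in enumerate(cmd_pl)]
-- ===== Notes on version B (the rewrite author's own statement) =====
-- stated objective: alternative
-- what changed: Replaces the fused loop threading a running cursor through each iteration by a prefix-sum table of word lengths built in one pass plus an index-driven second pass that computes each interval directly from the table.
import Mathlib
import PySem

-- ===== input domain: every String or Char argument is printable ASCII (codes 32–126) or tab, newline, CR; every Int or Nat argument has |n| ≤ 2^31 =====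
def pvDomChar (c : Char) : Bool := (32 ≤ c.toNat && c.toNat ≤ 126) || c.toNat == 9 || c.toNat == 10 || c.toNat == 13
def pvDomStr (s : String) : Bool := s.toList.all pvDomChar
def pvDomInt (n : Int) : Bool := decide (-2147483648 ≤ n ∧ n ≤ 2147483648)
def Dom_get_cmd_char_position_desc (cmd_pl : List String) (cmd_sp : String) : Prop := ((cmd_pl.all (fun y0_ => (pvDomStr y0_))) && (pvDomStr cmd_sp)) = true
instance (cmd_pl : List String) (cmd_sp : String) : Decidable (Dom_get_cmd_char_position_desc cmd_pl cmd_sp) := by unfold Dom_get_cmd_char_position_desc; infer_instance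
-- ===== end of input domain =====

-- B replaces A's fused cursor-threading loop by a prefix-sum table of word lengths
-- plus an index-driven interval pass (objective: alternative decomposition, same value).

-- ===== PORT A =====
-- single loop threading a running cursor `curr` through each iteration
def get_cmd_char_position_desc (cmd_pl : List String) (cmd_sp : String) : List (Int × Int) :=
  let sp_len : Int := PySem.Str.len cmd_sp
  ((PySem.List.pyRange 0 cmd_pl.length 1).foldl
    (fun (st : List (Int × Int) × Int) i =>
      let supp := sp_len * i
      let kw := PySem.List.pyGetD cmd_pl i ""
      let l := PySem.Str.len kw
      let e := st.2 + l - 1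
      (st.1 ++ [(st.2 + supp, e + supp)], e + 1))
    ([], 0)).1

-- ===== PORT B =====
-- pass 1: table of cumulative word lengths before each index (prefix[-1] is pyGetD acc (-1))
def pvPrefixTable (cmd_pl : List String) : List Int :=
  cmd_pl.foldl (fun acc w => acc ++ [PySem.List.pyGetD acc (-1) 0 + PySem.Str.len w]) [0]

-- pass 2: index-driven interval construction from the table
def get_cmd_char_position_desc_alt (cmd_pl : List String) (cmd_sp : String) : List (Int × Int) :=
  let pre := pvPrefixTable cmd_pl
  let sp : Int := PySem.Str.len cmd_sp
  (PySem.List.enumerate cmd_pl 0).map (fun iw =>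
    (PySem.List.pyGetD pre iw.1 0 + iw.1 * sp,
     PySem.List.pyGetD pre iw.1 0 + PySem.Str.len iw.2 - 1 + iw.1 * sp))

-- ===== PRECONDITION & SPEC =====
def Spec_get_cmd_char_position_desc (cmd_pl : List String) (cmd_sp : String) (out : List (Int × Int)) : Prop := out = get_cmd_char_position_desc_alt cmd_pl cmd_sp
instance (cmd_pl : List String) (cmd_sp : String) (out : List (Int × Int)) : Decidable (Spec_get_cmd_char_position_desc cmd_pl cmd_sp out) := by unfold Spec_get_cmd_char_position_desc; infer_instance

-- ===== CLAIM (what is proved, stated in full; the proofs are below) =====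
def Claim_equal_get_cmd_char_position_desc : Prop := ∀ (cmd_pl : List String) (cmd_sp : String), Dom_get_cmd_char_position_desc cmd_pl cmd_sp → Spec_get_cmd_char_position_desc cmd_pl cmd_sp (get_cmd_char_position_desc cmd_pl cmd_sp)

-- ===== LEMMAS AND PROOFS =====

-- sum of the word lengths of a list (the quantity both programs accumulate)
def pvSof (xs : List String) : Int := (xs.map PySem.Str.len).sum

-- tail of B's prefix table below a running offset s
def pvPrefRest : List String → Int → List Int
  | [], _ => []
  | w :: ws, s => (s + PySem.Str.len w) :: pvPrefRest ws (s + PySem.Str.len w)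

-- the common per-index interval formula
def pvG (xs : List String) (sp : Int) (k : Nat) : Int × Int :=
  (pvSof (xs.take k) + sp * k,
   pvSof (xs.take k) + PySem.Str.len (PySem.List.pyGetD xs (k : Int) "") - 1 + sp * k)

theorem pvPrefixTable_aux (xs : List String) : ∀ (acc : List Int) (s : Int),
    PySem.List.pyGetD acc (-1) 0 = s →
    xs.foldl (fun acc w => acc ++ [PySem.List.pyGetD acc (-1) 0 + PySem.Str.len w]) acc
      = acc ++ pvPrefRest xs s := by
  induction xs with
  | nil => intro acc s _; simp [pvPrefRest]
  | cons w ws ih =>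
    intro acc s hs
    simp only [List.foldl_cons, pvPrefRest]
    rw [hs, ih (acc ++ [s + PySem.Str.len w]) (s + PySem.Str.len w)
        (PySem.List.pyGetD_neg_one_append_singleton _ _ _)]
    simp

theorem pvPrefixTable_eq (xs : List String) :
    pvPrefixTable xs = 0 :: pvPrefRest xs 0 := by
  unfold pvPrefixTable
  rw [pvPrefixTable_aux xs [0] 0 (by decide)]
  simp

theorem pvPrefRest_getD (xs : List String) : ∀ (s : Int) (k : Nat), k < xs.length →
    (pvPrefRest xs s).getD k 0 = s + pvSof (xs.take (k + 1)) := by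
  induction xs with
  | nil => intro s k h; simp at h
  | cons w ws ih =>
    intro s k h
    cases k with
    | zero => simp [pvPrefRest, pvSof]
    | succ j =>
      simp only [pvPrefRest, List.getD_cons_succ]
      rw [ih (s + PySem.Str.len w) j (by simpa using h)]
      simp [pvSof]; ring

theorem pvPrefix_getD (xs : List String) (k : Nat) (hk : k ≤ xs.length) :
    (pvPrefixTable xs).getD k 0 = pvSof (xs.take k) := by
  rw [pvPrefixTable_eq]
  cases k with
  | zero => simp [pvSof]
  | succ j =>
    simp only [List.getD_cons_succ]
    rw [pvPrefRest_getD xs 0 j (by omega)]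
    simp

theorem pvSof_take_succ (xs : List String) (m : Nat) (hm : m < xs.length) :
    pvSof (xs.take (m + 1)) = pvSof (xs.take m) + PySem.Str.len xs[m] := by
  have h : xs.take (m + 1) = xs.take m ++ [xs[m]] := by
    rw [List.take_add_one, List.getElem?_eq_getElem hm]; rfl
  unfold pvSof
  rw [h, List.map_append, List.sum_append]
  simp

-- invariant of A's loop: after m iterations the list holds pvG for indices < m
-- and the cursor holds the total length of the first m words
theorem pvA_inv (xs : List String) (sp : Int) : ∀ (m : Nat), m ≤ xs.length →
    ((PySem.List.pyRange 0 m 1).foldl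
      (fun (st : List (Int × Int) × Int) i =>
        (st.1 ++ [(st.2 + sp * i, (st.2 + PySem.Str.len (PySem.List.pyGetD xs i "") - 1) + sp * i)],
         (st.2 + PySem.Str.len (PySem.List.pyGetD xs i "") - 1) + 1))
      ([], 0))
    = ((List.range m).map (pvG xs sp), pvSof (xs.take m)) := by
  intro m
  induction m with
  | zero => intro _; simp [PySem.List.pyRange_one_eq_nil, pvSof]
  | succ n ih =>
    intro h
    have hn : n < xs.length := by omega
    have hsplit : PySem.List.pyRange 0 ((n : Int) + 1) 1
        = PySem.List.pyRange 0 n 1 ++ [(n : Int)] := by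
      exact PySem.List.pyRange_one_succ_right (by positivity)
    rw [show ((n + 1 : Nat) : Int) = (n : Int) + 1 by push_cast; ring, hsplit,
        List.foldl_append, ih (by omega)]
    simp only [List.foldl_cons, List.foldl_nil, List.range_succ, List.map_append, List.map_cons,
        List.map_nil]
    simp only [Prod.mk.injEq]
    constructor
    · simp [pvG]
    · rw [pvSof_take_succ xs n hn]
      have : PySem.List.pyGetD xs (n : Int) "" = xs[n] := by
        simp [PySem.List.pyGetD_natCast, List.getD, List.getElem?_eq_getElem hn]
      rw [this]; ring

theorem pvB_eq (xs : List String) (sp : Int) (prefGet : ∀ k : Nat, k ≤ xs.length →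
    (pvPrefixTable xs).getD k 0 = pvSof (xs.take k)) :
    ((PySem.List.enumerate xs 0).map (fun iw =>
      (PySem.List.pyGetD (pvPrefixTable xs) iw.1 0 + iw.1 * sp,
       PySem.List.pyGetD (pvPrefixTable xs) iw.1 0 + PySem.Str.len iw.2 - 1 + iw.1 * sp)))
    = (List.range xs.length).map (pvG xs sp) := by
  rw [PySem.List.enumerate_eq_map_pyRange (d := "")]
  rw [List.map_map]
  have hr : PySem.List.pyRange 0 (PySem.List.len xs) 1
      = (List.range xs.length).map (fun k : Nat => (k : Int)) := by
    rw [PySem.List.pyRange_one]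
    simp
  rw [hr, List.map_map]
  apply List.map_congr_left
  intro k hk
  have hk' : k < xs.length := List.mem_range.mp hk
  have hpre : PySem.List.pyGetD (pvPrefixTable xs) (k : Int) 0 = pvSof (xs.take k) := by
    rw [PySem.List.pyGetD_natCast]
    exact prefGet k (by omega)
  simp only [Function.comp, hpre, pvG, Prod.mk.injEq]
  constructor <;> ring

-- ===== VERDICT (by name: the statement is the Claim_ definition above) =====
theorem get_cmd_char_position_desc_spec : Claim_equal_get_cmd_char_position_desc := by
  intro cmd_pl cmd_sp _
  unfold Spec_get_cmd_char_position_desc get_cmd_char_position_desc get_cmd_char_position_desc_alt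
  rw [pvB_eq cmd_pl (PySem.Str.len cmd_sp) (fun k hk => pvPrefix_getD cmd_pl k hk)]
  have := pvA_inv cmd_pl (PySem.Str.len cmd_sp) cmd_pl.length (le_refl _)
  simpa using congrArg Prod.fst this
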